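-- pv_equiv track=rewrite | github.com/xlf0708/MultiLabelClassification-master | xiao/SCMJ/lib_MJ.py | get_32N_gang
-- ===== SOURCE A (Python) =====
-- def get_32N_gang(cards=[]):
--     """
--     功能：计算所有存在的手牌的３Ｎ与２Ｎ的集合，例如[3,4,5]　，将得到[[3,4],[3,5],[4,5],[3,4,5]]
--     思路：为减少计算量，对长度在12张以上的单花色的手牌，当存在顺子时，不再计算搭子
--     :param cards: 手牌　[]
--     :return: 3N与2N的集合　[[]]
--     """
--     cards.sort()
--     gang = []
--     kz = []
--     sz = []
--     aa = []
--     ab = []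
--     ac = []
--     lastCard = 0
--     # 对长度在12张以上的单花色的手牌，当存在顺子时，不再计算搭子
--     if len(cards) >= 12:
--         for card in cards:
--             if card == lastCard:
--                 continue
--             else:
--                 lastCard = card
--             if cards.count((card)) == 4:
--                 gang.append([card, card, card, card])
--             if cards.count(card) >= 3:
--                 kz.append([card, card, card])
--             elif cards.count(card) >= 2:
--                 aa.append([card, card])
--             if card + 1 in cards and card + 2 in cards:
--                 sz.append([card, card + 1, card + 2])
--             else:
--                 if card + 1 in cards:
--                     ab.append([card, card + 1])
--                 if card + 2 in cards:
--                     ac.append([card, card + 2])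
--     else:
--         for card in cards:
--             if card == lastCard:
--                 continue
--             else:
--                 lastCard = card
--             if cards.count(card) == 4:
--                 gang.append([card, card, card, card])
--             if cards.count(card) >= 3:
--                 kz.append([card, card, card])
--             if cards.count(card) >= 2:
--                 aa.append([card, card])
--             if card + 1 in cards and card + 2 in cards:
--                 sz.append([card, card + 1, card + 2])
--             if card + 1 in cards:
--                 ab.append([card, card + 1])
--             if card + 2 in cards:
--                 ac.append([card, card + 2])
--     return gang + kz + sz + aa + ab + ac
-- ===== SOURCE B (Python) =====
-- def _runs(cs):
--     """Run-length encode an already-sorted list into (value, multiplicity) pairs."""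
--     runs = []
--     cur = None
--     for c in cs:
--         if cur is not None and cur[0] == c:
--             cur = (c, cur[1] + 1)
--         else:
--             if cur is not None:
--                 runs.append(cur)
--             cur = (c, 1)
--     if cur is not None:
--         runs.append(cur)
--     return runs
--
--
-- def get_32N_gang(cards=[]):
--     cards.sort()
--     r = _runs(cards)
--     big = len(cards) >= 12
--     gang = []
--     kz = []
--     sz = []
--     aa = []
--     ab = []
--     ac = []
--     while r:
--         v, n = r[0]
--         nxt = r[1:]
--         has1 = len(nxt) >= 1 and nxt[0][0] == v + 1
--         has2 = (len(nxt) >= 1 and nxt[0][0] == v + 2) or (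
--             len(nxt) >= 2 and nxt[0][0] == v + 1 and nxt[1][0] == v + 2)
--         if n == 4:
--             gang.append([v, v, v, v])
--         if n >= 3:
--             kz.append([v, v, v])
--         if (n == 2) if big else (n >= 2):
--             aa.append([v, v])
--         if has1 and has2:
--             sz.append([v, v + 1, v + 2])
--         if has1 and (not big or not has2):
--             ab.append([v, v + 1])
--         if has2 and (not big or not has1):
--             ac.append([v, v + 2])
--         r = nxt
--     return gang + kz + sz + aa + ab + ac
-- ===== Notes on version B (the rewrite author's own statement) =====
-- stated objective: faster
-- what changed: A rescans the whole hand for every card (list.count and `in` inside the loop); B run-length-encodes the sorted hand once and decides every meld from each run's multiplicity plus the values of the next two runs (a local window), with no count or membership scans at all.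
-- intended difference: On hands whose smallest value is 0 and where 0 could form a meld (another 0, a 1 or a 2 present), A's lastCard sentinel starts at 0 and silently skips value 0, omitting every meld that involves it; B emits those melds, which is the intended 'all triples/pairs of the hand'. — e.g. on get_32N_gang([0, 0]): A returns [], B returns [[0, 0]]
import Mathlib
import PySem

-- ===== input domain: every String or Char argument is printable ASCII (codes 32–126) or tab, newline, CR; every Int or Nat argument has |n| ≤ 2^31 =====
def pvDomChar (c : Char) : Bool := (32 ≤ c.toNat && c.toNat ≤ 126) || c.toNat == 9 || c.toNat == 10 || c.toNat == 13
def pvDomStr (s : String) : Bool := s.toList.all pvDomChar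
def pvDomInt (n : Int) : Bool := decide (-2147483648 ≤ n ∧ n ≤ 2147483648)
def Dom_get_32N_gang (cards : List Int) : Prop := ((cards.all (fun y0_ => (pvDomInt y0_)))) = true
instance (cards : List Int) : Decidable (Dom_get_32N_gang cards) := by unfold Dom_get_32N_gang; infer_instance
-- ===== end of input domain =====

-- B replaces A's single loop with its repeated whole-hand list.count/`in` scans by a one-pass
-- run-length encoding of the sorted hand; every meld is then decided from a run's multiplicity
-- and the values of the next two runs (a local window), with no count or membership scan.
-- Both versions sort their argument in place (Python side effect; B performs the same mutation);
-- the equivalence proved here is about the return value.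

-- ===== PORT A =====
-- loop state: (gang, kz, sz, aa, ab, ac, lastCard)
def pvSt : Type := List (List Int) × List (List Int) × List (List Int) × List (List Int) × List (List Int) × List (List Int) × Int

-- body of A's `for card in cards` loop in the len(cards) >= 12 branch (elif / nested else kept)
def pvStep12 (cs : List Int) (st : pvSt) (card : Int) : pvSt :=
  match st with
  | (gang, kz, sz, aa, ab, ac, lastCard) =>
    if card == lastCard then (gang, kz, sz, aa, ab, ac, lastCard)
    else
      let gang := if PySem.List.count cs card == 4 then gang ++ [[card, card, card, card]] else gang
      let (kz, aa) :=
        if 3 ≤ PySem.List.count cs card then (kz ++ [[card, card, card]], aa)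
        else if 2 ≤ PySem.List.count cs card then (kz, aa ++ [[card, card]])
        else (kz, aa)
      let (sz, ab, ac) :=
        if cs.contains (card + 1) && cs.contains (card + 2) then (sz ++ [[card, card + 1, card + 2]], ab, ac)
        else (sz,
              if cs.contains (card + 1) then ab ++ [[card, card + 1]] else ab,
              if cs.contains (card + 2) then ac ++ [[card, card + 2]] else ac)
      (gang, kz, sz, aa, ab, ac, card)

-- body of A's loop in the len(cards) < 12 branch (all tests independent)
def pvStepS (cs : List Int) (st : pvSt) (card : Int) : pvSt :=
  match st with
  | (gang, kz, sz, aa, ab, ac, lastCard) =>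
    if card == lastCard then (gang, kz, sz, aa, ab, ac, lastCard)
    else
      let gang := if PySem.List.count cs card == 4 then gang ++ [[card, card, card, card]] else gang
      let kz := if 3 ≤ PySem.List.count cs card then kz ++ [[card, card, card]] else kz
      let aa := if 2 ≤ PySem.List.count cs card then aa ++ [[card, card]] else aa
      let sz := if cs.contains (card + 1) && cs.contains (card + 2) then sz ++ [[card, card + 1, card + 2]] else sz
      let ab := if cs.contains (card + 1) then ab ++ [[card, card + 1]] else ab
      let ac := if cs.contains (card + 2) then ac ++ [[card, card + 2]] else ac
      (gang, kz, sz, aa, ab, ac, card)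

def get_32N_gang (cards : List Int) : List (List Int) :=
  let cs := PySem.List.sorted cards (fun x => x)
  let st0 : pvSt := ([], [], [], [], [], [], 0)
  let res := if 12 ≤ cs.length then cs.foldl (pvStep12 cs) st0 else cs.foldl (pvStepS cs) st0
  match res with
  | (gang, kz, sz, aa, ab, ac, _) => gang ++ kz ++ sz ++ aa ++ ab ++ ac

-- ===== PORT B =====
-- _runs: one pass over the sorted list, carrying the current (value, multiplicity) run
def pvRunsStep (st : List (Int × Int) × Option (Int × Int)) (c : Int) : List (Int × Int) × Option (Int × Int) :=
  match st with
  | (runs, some (v, n)) => if v == c then (runs, some (c, n + 1)) else (runs ++ [(v, n)], some (c, 1))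
  | (runs, none) => (runs, some (c, 1))

def pvFlush (st : List (Int × Int) × Option (Int × Int)) : List (Int × Int) :=
  match st with
  | (runs, some vn) => runs ++ [vn]
  | (runs, none) => runs

def pvRuns (cs : List Int) : List (Int × Int) := pvFlush (cs.foldl pvRunsStep ([], none))

-- has1 = nxt[0][0] == v+1 ; has2 = nxt[0][0] == v+2 or (nxt[0][0] == v+1 and nxt[1][0] == v+2)
def pvHas1 (v : Int) (nxt : List (Int × Int)) : Bool :=
  match nxt with
  | (w, _) :: _ => w == v + 1
  | [] => false

def pvHas2 (v : Int) (nxt : List (Int × Int)) : Bool :=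
  match nxt with
  | (w, _) :: rest =>
      w == v + 2 || (w == v + 1 && (match rest with
        | (u, _) :: _ => u == v + 2
        | [] => false))
  | [] => false

def pvSt6 : Type := List (List Int) × List (List Int) × List (List Int) × List (List Int) × List (List Int) × List (List Int)

-- B's `while r:` loop: the rest of the run list IS the window source
def pvBLoop (big : Bool) : List (Int × Int) → pvSt6 → pvSt6
  | [], st => st
  | (v, n) :: nxt, (gang, kz, sz, aa, ab, ac) =>
    pvBLoop big nxt
      (if n == 4 then gang ++ [[v, v, v, v]] else gang,
       if 3 ≤ n then kz ++ [[v, v, v]] else kz,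
       if pvHas1 v nxt && pvHas2 v nxt then sz ++ [[v, v + 1, v + 2]] else sz,
       if (if big then n == 2 else decide (2 ≤ n)) then aa ++ [[v, v]] else aa,
       if pvHas1 v nxt && (!big || !pvHas2 v nxt) then ab ++ [[v, v + 1]] else ab,
       if pvHas2 v nxt && (!big || !pvHas1 v nxt) then ac ++ [[v, v + 2]] else ac)

def get_32N_gang_alt (cards : List Int) : List (List Int) :=
  let cs := PySem.List.sorted cards (fun x => x)
  let r := pvRuns cs
  let big := decide (12 ≤ cs.length)
  match pvBLoop big r ([], [], [], [], [], []) with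
  | (gang, kz, sz, aa, ab, ac) => gang ++ kz ++ sz ++ aa ++ ab ++ ac

-- ===== PRECONDITION & SPEC =====
-- On hands whose smallest card value is 0 and where 0 could enter a meld (another 0, a 1 or a 2
-- is present), A's lastCard sentinel starts at 0 and silently skips the value 0, omitting all its
-- melds; B emits them, which is the intended reading of "all triples/pairs of the hand".
def D_get_32N_gang (cards : List Int) : Prop :=
  (0 : Int) ∈ cards ∧ (∀ c ∈ cards, 0 ≤ c) ∧
    (2 ≤ cards.count (0 : Int) ∨ (1 : Int) ∈ cards ∨ (2 : Int) ∈ cards)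
instance (cards : List Int) : Decidable (D_get_32N_gang cards) := by unfold D_get_32N_gang; infer_instance

def Spec_get_32N_gang (cards : List Int) (out : List (List Int)) : Prop := ¬ D_get_32N_gang cards → out = get_32N_gang_alt cards
instance (cards : List Int) (out : List (List Int)) : Decidable (Spec_get_32N_gang cards out) := by unfold Spec_get_32N_gang; infer_instance

def pvDiffWitness_get_32N_gang : List Int := [0, 0]
def pvDiffWitnessOut_get_32N_gang : (List (List Int)) × (List (List Int)) := ([], [[0, 0]])

-- ===== CLAIM (what is proved, stated in full; the proofs are below) =====
def Claim_unchanged_get_32N_gang : Prop := ∀ (cards : List Int), Dom_get_32N_gang cards → Spec_get_32N_gang cards (get_32N_gang cards)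
def Claim_changed_get_32N_gang : Prop := Dom_get_32N_gang (pvDiffWitness_get_32N_gang) ∧ D_get_32N_gang (pvDiffWitness_get_32N_gang) ∧ get_32N_gang (pvDiffWitness_get_32N_gang) = pvDiffWitnessOut_get_32N_gang.1 ∧ get_32N_gang_alt (pvDiffWitness_get_32N_gang) = pvDiffWitnessOut_get_32N_gang.2 ∧ pvDiffWitnessOut_get_32N_gang.1 ≠ pvDiffWitnessOut_get_32N_gang.2

def Claim_exact_get_32N_gang : Prop := ∀ (cards : List Int), Dom_get_32N_gang cards → D_get_32N_gang cards → get_32N_gang cards ≠ get_32N_gang_alt cards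

-- ===== LEMMAS AND PROOFS =====
-- processed values of A's lastCard-dedup loop over l, starting from sentinel `last`
def pvProc : List Int → Int → List Int
  | [], _ => []
  | c :: t, last => if c = last then pvProc t last else c :: pvProc t c

-- distinct values of l in order (lastCard-dedup with no initial skip)
def pvU : List Int → List Int
  | [] => []
  | c :: t => c :: pvProc t c

def pvLA : List Int → Int → Int
  | [], last => last
  | c :: t, last => pvLA t (if c = last then last else c)

def pvEmit (p : Int → Bool) (f : Int → List Int) (l : List Int) : List (List Int) :=
  (l.filter p).map f

def pvOut (q1 q2 q3 q4 q5 q6 : Int → Bool) (P : List Int) : List (List Int) :=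
  pvEmit q1 (fun v => [v, v, v, v]) P ++ pvEmit q2 (fun v => [v, v, v]) P ++
  pvEmit q3 (fun v => [v, v + 1, v + 2]) P ++ pvEmit q4 (fun v => [v, v]) P ++
  pvEmit q5 (fun v => [v, v + 1]) P ++ pvEmit q6 (fun v => [v, v + 2]) P

def pvGStep (p1 p2 p3 p4 p5 p6 : Int → Bool) (st : pvSt) (card : Int) : pvSt :=
  match st with
  | (g, k, s, a, b, c, last) =>
    if card = last then (g, k, s, a, b, c, last)
    else
      (if p1 card then g ++ [[card, card, card, card]] else g,
       if p2 card then k ++ [[card, card, card]] else k,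
       if p3 card then s ++ [[card, card + 1, card + 2]] else s,
       if p4 card then a ++ [[card, card]] else a,
       if p5 card then b ++ [[card, card + 1]] else b,
       if p6 card then c ++ [[card, card + 2]] else c,
       card)

def pvPg (cs : List Int) (v : Int) : Bool := PySem.List.count cs v == 4
def pvPk (cs : List Int) (v : Int) : Bool := decide (3 ≤ PySem.List.count cs v)
def pvPs (cs : List Int) (v : Int) : Bool := cs.contains (v + 1) && cs.contains (v + 2)
def pvPaB (cs : List Int) (v : Int) : Bool := PySem.List.count cs v == 2
def pvPaS (cs : List Int) (v : Int) : Bool := decide (2 ≤ PySem.List.count cs v)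
def pvPbB (cs : List Int) (v : Int) : Bool := cs.contains (v + 1) && !cs.contains (v + 2)
def pvPbS (cs : List Int) (v : Int) : Bool := cs.contains (v + 1)
def pvPcB (cs : List Int) (v : Int) : Bool := cs.contains (v + 2) && !cs.contains (v + 1)
def pvPcS (cs : List Int) (v : Int) : Bool := cs.contains (v + 2)

theorem pvStep12_eq (cs : List Int) (st : pvSt) (card : Int) :
    pvStep12 cs st card
      = pvGStep (pvPg cs) (pvPk cs) (pvPs cs) (pvPaB cs) (pvPbB cs) (pvPcB cs) st card := by
  obtain ⟨g, k, s, a, b, c, last⟩ := st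
  simp only [pvStep12, pvGStep, pvPg, pvPk, pvPs, pvPaB, pvPbB, pvPcB, beq_iff_eq]
  by_cases h : card = last
  · simp [h]
  · simp [h]
    split_ifs <;> simp_all <;> omega

theorem pvStepS_eq (cs : List Int) (st : pvSt) (card : Int) :
    pvStepS cs st card
      = pvGStep (pvPg cs) (pvPk cs) (pvPs cs) (pvPaS cs) (pvPbS cs) (pvPcS cs) st card := by
  obtain ⟨g, k, s, a, b, c, last⟩ := st
  simp only [pvStepS, pvGStep, pvPg, pvPk, pvPs, pvPaS, pvPbS, pvPcS, beq_iff_eq]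
  by_cases h : card = last
  · simp [h]
  · simp [h]
    split_ifs <;> simp_all

theorem pvEmit_cons (p : Int → Bool) (f : Int → List Int) (x : Int) (l : List Int) :
    pvEmit p f (x :: l) = (if p x then [f x] else []) ++ pvEmit p f l := by
  cases hp : p x <;> simp [pvEmit, hp]

theorem pvFold (p1 p2 p3 p4 p5 p6 : Int → Bool) (l : List Int) :
    ∀ (g k s a b c : List (List Int)) (last : Int),
      l.foldl (pvGStep p1 p2 p3 p4 p5 p6) (g, k, s, a, b, c, last) =
        (g ++ pvEmit p1 (fun v => [v, v, v, v]) (pvProc l last),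
         k ++ pvEmit p2 (fun v => [v, v, v]) (pvProc l last),
         s ++ pvEmit p3 (fun v => [v, v + 1, v + 2]) (pvProc l last),
         a ++ pvEmit p4 (fun v => [v, v]) (pvProc l last),
         b ++ pvEmit p5 (fun v => [v, v + 1]) (pvProc l last),
         c ++ pvEmit p6 (fun v => [v, v + 2]) (pvProc l last),
         pvLA l last) := by
  induction l with
  | nil => intro g k s a b c last; simp [pvProc, pvLA, pvEmit]
  | cons x t ih =>
    intro g k s a b c last
    rw [List.foldl_cons]
    by_cases h : x = last
    · have hg : pvGStep p1 p2 p3 p4 p5 p6 (g, k, s, a, b, c, last) x = (g, k, s, a, b, c, last) := by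
        simp [pvGStep, h]
      rw [hg, ih]
      simp [pvProc, h, pvLA]
    · have hg : pvGStep p1 p2 p3 p4 p5 p6 (g, k, s, a, b, c, last) x =
        (if p1 x then g ++ [[x, x, x, x]] else g,
         if p2 x then k ++ [[x, x, x]] else k,
         if p3 x then s ++ [[x, x + 1, x + 2]] else s,
         if p4 x then a ++ [[x, x]] else a,
         if p5 x then b ++ [[x, x + 1]] else b,
         if p6 x then c ++ [[x, x + 2]] else c,
         x) := by simp [pvGStep, h]
      rw [hg, ih]
      have hp : pvProc (x :: t) last = x :: pvProc t x := by simp [pvProc, h]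
      have hl : pvLA (x :: t) last = pvLA t x := by simp [pvLA, h]
      rw [hp, hl]
      refine congrArg₂ _ ?_ (congrArg₂ _ ?_ (congrArg₂ _ ?_ (congrArg₂ _ ?_ (congrArg₂ _ ?_ (congrArg₂ _ ?_ rfl))))) <;>
        (rw [pvEmit_cons]; split_ifs <;> simp)

theorem pvProc_mem :
    ∀ (cs : List Int), cs.Pairwise (· ≤ ·) →
      ∀ (last x : Int), (∀ y ∈ cs, last ≤ y) →
        (x ∈ pvProc cs last ↔ x ∈ cs ∧ x ≠ last) := by
  intro cs
  induction cs with
  | nil => intro _ last x _; simp [pvProc]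
  | cons c t ih =>
    intro hp last x hlb
    have hct : ∀ y ∈ t, c ≤ y := (List.pairwise_cons.1 hp).1
    have hpt : t.Pairwise (· ≤ ·) := (List.pairwise_cons.1 hp).2
    by_cases hc : c = last
    · rw [show pvProc (c :: t) last = pvProc t last by simp [pvProc, hc]]
      rw [ih hpt last x (hc ▸ hct)]
      subst hc
      simp only [List.mem_cons]
      constructor
      · rintro ⟨hxt, hne⟩; exact ⟨Or.inr hxt, hne⟩
      · rintro ⟨(rfl | hxt), hne⟩
        · exact absurd rfl hne
        · exact ⟨hxt, hne⟩
    · rw [show pvProc (c :: t) last = c :: pvProc t c by simp [pvProc, hc]]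
      have hlc : last < c := lt_of_le_of_ne (hlb c (List.mem_cons_self)) (Ne.symm hc)
      simp only [List.mem_cons]
      rw [ih hpt c x hct]
      constructor
      · rintro (rfl | ⟨hxt, hxc⟩)
        · exact ⟨Or.inl rfl, hc⟩
        · exact ⟨Or.inr hxt, by have := hct x hxt; omega⟩
      · rintro ⟨(rfl | hxt), hne⟩
        · exact Or.inl rfl
        · by_cases hxc : x = c
          · exact Or.inl hxc
          · exact Or.inr ⟨hxt, hxc⟩

theorem pvProc_pairwise :
    ∀ (cs : List Int), cs.Pairwise (· ≤ ·) →
      ∀ (last : Int), (∀ y ∈ cs, last ≤ y) →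
        (pvProc cs last).Pairwise (· < ·) := by
  intro cs
  induction cs with
  | nil => intro _ last _; simp [pvProc]
  | cons c t ih =>
    intro hp last hlb
    have hct : ∀ y ∈ t, c ≤ y := (List.pairwise_cons.1 hp).1
    have hpt : t.Pairwise (· ≤ ·) := (List.pairwise_cons.1 hp).2
    by_cases hc : c = last
    · rw [show pvProc (c :: t) last = pvProc t last by simp [pvProc, hc]]
      exact ih hpt last (hc ▸ hct)
    · rw [show pvProc (c :: t) last = c :: pvProc t c by simp [pvProc, hc]]
      refine List.pairwise_cons.2 ⟨?_, ih hpt c hct⟩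
      intro y hy
      have := (pvProc_mem t hpt c y hct).1 hy
      have := hct y this.1
      exact lt_of_le_of_ne this (Ne.symm ((pvProc_mem t hpt c y hct).1 hy).2)

theorem pvU_mem (cs : List Int) (hp : cs.Pairwise (· ≤ ·)) (x : Int) :
    x ∈ pvU cs ↔ x ∈ cs := by
  cases cs with
  | nil => simp [pvU]
  | cons c t =>
    have hct : ∀ y ∈ t, c ≤ y := (List.pairwise_cons.1 hp).1
    have hpt : t.Pairwise (· ≤ ·) := (List.pairwise_cons.1 hp).2
    show x ∈ c :: pvProc t c ↔ x ∈ c :: t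
    simp only [List.mem_cons]
    rw [pvProc_mem t hpt c x hct]
    constructor
    · rintro (rfl | ⟨hxt, _⟩)
      · exact Or.inl rfl
      · exact Or.inr hxt
    · rintro (rfl | hxt)
      · exact Or.inl rfl
      · by_cases hxc : x = c
        · exact Or.inl hxc
        · exact Or.inr ⟨hxt, hxc⟩

theorem pvU_pairwise (cs : List Int) (hp : cs.Pairwise (· ≤ ·)) :
    (pvU cs).Pairwise (· < ·) := by
  cases cs with
  | nil => exact List.Pairwise.nil
  | cons c t =>
    have hct : ∀ y ∈ t, c ≤ y := (List.pairwise_cons.1 hp).1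
    have hpt : t.Pairwise (· ≤ ·) := (List.pairwise_cons.1 hp).2
    show (c :: pvProc t c).Pairwise (· < ·)
    refine List.pairwise_cons.2 ⟨?_, pvProc_pairwise t hpt c hct⟩
    intro y hy
    have h := (pvProc_mem t hpt c y hct).1 hy
    exact lt_of_le_of_ne (hct y h.1) (Ne.symm h.2)

theorem pvProc_eq_pvU (cs : List Int) (hh : cs.head? ≠ some 0) : pvProc cs 0 = pvU cs := by
  cases cs with
  | nil => rfl
  | cons c t =>
    have hc : c ≠ 0 := by simpa using hh
    simp [pvProc, pvU, hc]

theorem pvU_zero (t : List Int) : pvU ((0 : Int) :: t) = 0 :: pvProc ((0 : Int) :: t) 0 := by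
  simp [pvU, pvProc]

theorem pvOut_cons_zero (q1 q2 q3 q4 q5 q6 : Int → Bool) (P : List Int)
    (h1 : q1 0 = false) (h2 : q2 0 = false) (h3 : q3 0 = false)
    (h4 : q4 0 = false) (h5 : q5 0 = false) (h6 : q6 0 = false) :
    pvOut q1 q2 q3 q4 q5 q6 ((0 : Int) :: P) = pvOut q1 q2 q3 q4 q5 q6 P := by
  simp [pvOut, pvEmit_cons, h1, h2, h3, h4, h5, h6]

theorem pvA_char (cards : List Int) :
    get_32N_gang cards =
      (if 12 ≤ (PySem.List.sorted cards (fun x => x)).length then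
        pvOut (pvPg (PySem.List.sorted cards (fun x => x))) (pvPk (PySem.List.sorted cards (fun x => x)))
              (pvPs (PySem.List.sorted cards (fun x => x))) (pvPaB (PySem.List.sorted cards (fun x => x)))
              (pvPbB (PySem.List.sorted cards (fun x => x))) (pvPcB (PySem.List.sorted cards (fun x => x)))
              (pvProc (PySem.List.sorted cards (fun x => x)) 0)
      else
        pvOut (pvPg (PySem.List.sorted cards (fun x => x))) (pvPk (PySem.List.sorted cards (fun x => x)))
              (pvPs (PySem.List.sorted cards (fun x => x))) (pvPaS (PySem.List.sorted cards (fun x => x)))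
              (pvPbS (PySem.List.sorted cards (fun x => x))) (pvPcS (PySem.List.sorted cards (fun x => x)))
              (pvProc (PySem.List.sorted cards (fun x => x)) 0)) := by
  simp only [get_32N_gang]
  set cs := PySem.List.sorted cards (fun x => x) with hcs
  by_cases hb : 12 ≤ cs.length
  · rw [if_pos hb, if_pos hb]
    have hf : cs.foldl (pvStep12 cs) (([], [], [], [], [], [], 0) : pvSt)
        = cs.foldl (pvGStep (pvPg cs) (pvPk cs) (pvPs cs) (pvPaB cs) (pvPbB cs) (pvPcB cs))
            (([], [], [], [], [], [], 0) : pvSt) := by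
      apply List.foldl_ext
      intro st card _
      exact pvStep12_eq cs st card
    rw [hf, pvFold]
    simp [pvOut]
  · rw [if_neg hb, if_neg hb]
    have hf : cs.foldl (pvStepS cs) (([], [], [], [], [], [], 0) : pvSt)
        = cs.foldl (pvGStep (pvPg cs) (pvPk cs) (pvPs cs) (pvPaS cs) (pvPbS cs) (pvPcS cs))
            (([], [], [], [], [], [], 0) : pvSt) := by
      apply List.foldl_ext
      intro st card _
      exact pvStepS_eq cs st card
    rw [hf, pvFold]
    simp [pvOut]

-- ---- B-side: run-length encoding characterised as (value, count) over the distinct values ----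
-- grouping of v^n followed by l (structural version of B's fold)
def pvGext : Int → Int → List Int → List (Int × Int)
  | v, n, [] => [(v, n)]
  | v, n, c :: t => if c = v then pvGext v (n + 1) t else (v, n) :: pvGext c 1 t

theorem pvFlushFold (l : List Int) :
    ∀ (runs : List (Int × Int)) (v n : Int),
      pvFlush (l.foldl pvRunsStep (runs, some (v, n))) = runs ++ pvGext v n l := by
  induction l with
  | nil => intro runs v n; simp [pvFlush, pvGext]
  | cons c t ih =>
    intro runs v n
    rw [List.foldl_cons]
    by_cases h : v = c
    · subst h
      have hs : pvRunsStep (runs, some (v, n)) v = (runs, some (v, n + 1)) := by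
        simp [pvRunsStep]
      rw [hs, ih]
      have hg : pvGext v n (v :: t) = pvGext v (n + 1) t := by
        simp only [pvGext]
        rw [if_true]
      rw [hg]
    · have hs : pvRunsStep (runs, some (v, n)) c = (runs ++ [(v, n)], some (c, 1)) := by
        simp [pvRunsStep, h]
      rw [hs, ih]
      have hg : pvGext v n (c :: t) = (v, n) :: pvGext c 1 t := by
        simp only [pvGext]
        rw [if_neg (fun hh : c = v => h hh.symm)]
      rw [hg, List.append_assoc]
      rfl

theorem pvRuns_cons (c : Int) (t : List Int) : pvRuns (c :: t) = pvGext c 1 t := by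
  unfold pvRuns
  rw [List.foldl_cons]
  have : pvRunsStep ([], none) c = ([], some (c, 1)) := rfl
  rw [this]
  simpa using pvFlushFold t [] c 1

theorem pvGext_char :
    ∀ (t : List Int) (v n : Int), t.Pairwise (· ≤ ·) → (∀ y ∈ t, v ≤ y) →
      pvGext v n t = (v, n + (t.count v : Int)) :: (pvProc t v).map (fun w => (w, (t.count w : Int))) := by
  intro t
  induction t with
  | nil => intro v n _ _; simp [pvGext, pvProc]
  | cons c t' ih =>
    intro v n hp hlb
    have hct : ∀ y ∈ t', c ≤ y := (List.pairwise_cons.1 hp).1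
    have hpt : t'.Pairwise (· ≤ ·) := (List.pairwise_cons.1 hp).2
    by_cases h : c = v
    · subst h
    -- head run absorbs c
      have hg : pvGext c n (c :: t') = pvGext c (n + 1) t' := by simp [pvGext]
      rw [hg, ih c (n + 1) hpt hct]
      have hcnt : ((c :: t').count c : Int) = (t'.count c : Int) + 1 := by
        simp
      have hproc : pvProc (c :: t') c = pvProc t' c := by simp [pvProc]
      rw [hcnt, hproc]
      have hmap : (pvProc t' c).map (fun w => (w, ((c :: t').count w : Int)))
          = (pvProc t' c).map (fun w => (w, (t'.count w : Int))) := by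
        apply List.map_congr_left
        intro w hw
        have hwc : ¬ c = w := fun hh => ((pvProc_mem t' hpt c w hct).1 hw).2 hh.symm
        simp [hwc]
      rw [hmap]
      have : n + ((t'.count c : Int) + 1) = n + 1 + (t'.count c : Int) := by ring
      rw [this]
    · have hvc : v < c := lt_of_le_of_ne (hlb c List.mem_cons_self) (fun hh => h hh.symm)
      have hg : pvGext v n (c :: t') = (v, n) :: pvGext c 1 t' := by simp [pvGext, h]
      rw [hg, ih c 1 hpt hct]
      have hvt : v ∉ (c :: t') := by
        intro hv
        rcases List.mem_cons.1 hv with rfl | hv'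
        · omega
        · have := hct v hv'; omega
      have hcnt0 : ((c :: t').count v : Int) = 0 := by
        simp [List.count_eq_zero_of_not_mem hvt]
      have hproc : pvProc (c :: t') v = c :: pvProc t' c := by simp [pvProc, h]
      rw [hcnt0, hproc]
      have hcc : ((c :: t').count c : Int) = 1 + (t'.count c : Int) := by
        simp; ring
      have hmap : (pvProc t' c).map (fun w => (w, ((c :: t').count w : Int)))
          = (pvProc t' c).map (fun w => (w, (t'.count w : Int))) := by
        apply List.map_congr_left
        intro w hw
        have hwc : ¬ c = w := fun hh => ((pvProc_mem t' hpt c w hct).1 hw).2 hh.symm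
        simp [hwc]
      simp only [List.map_cons, hcc, hmap]
      simp

theorem pvRuns_char (cs : List Int) (hp : cs.Pairwise (· ≤ ·)) :
    pvRuns cs = (pvU cs).map (fun w => (w, (cs.count w : Int))) := by
  cases cs with
  | nil => rfl
  | cons c t =>
    have hct : ∀ y ∈ t, c ≤ y := (List.pairwise_cons.1 hp).1
    have hpt : t.Pairwise (· ≤ ·) := (List.pairwise_cons.1 hp).2
    rw [pvRuns_cons, pvGext_char t c 1 hpt hct]
    have hcnt : ((c :: t).count c : Int) = 1 + (t.count c : Int) := by
      simp; ring
    have hmap : (pvProc t c).map (fun w => (w, ((c :: t).count w : Int)))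
        = (pvProc t c).map (fun w => (w, (t.count w : Int))) := by
      apply List.map_congr_left
      intro w hw
      have hwc : ¬ c = w := fun hh => ((pvProc_mem t hpt c w hct).1 hw).2 hh.symm
      simp [hwc]
    show _ = ((c :: pvProc t c).map (fun w => (w, ((c :: t).count w : Int))))
    simp only [List.map_cons, hcnt, hmap]

-- B's loop over the runs of cs emits exactly A's per-value predicates over the distinct values
theorem pvBLoop_char (cs : List Int) (big : Bool) :
    ∀ (u : List Int), u.Pairwise (· < ·) →
      (∀ x ∈ u, x ∈ cs) →
      (∀ x : Int, x ∈ cs → x ∉ u → ∀ z ∈ u, x < z) →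
      ∀ (g k s a b c : List (List Int)),
      pvBLoop big (u.map (fun w => (w, (cs.count w : Int)))) (g, k, s, a, b, c) =
        (g ++ pvEmit (pvPg cs) (fun v => [v, v, v, v]) u,
         k ++ pvEmit (pvPk cs) (fun v => [v, v, v]) u,
         s ++ pvEmit (pvPs cs) (fun v => [v, v + 1, v + 2]) u,
         a ++ pvEmit (fun v => if big then pvPaB cs v else pvPaS cs v) (fun v => [v, v]) u,
         b ++ pvEmit (fun v => if big then pvPbB cs v else pvPbS cs v) (fun v => [v, v + 1]) u,
         c ++ pvEmit (fun v => if big then pvPcB cs v else pvPcS cs v) (fun v => [v, v + 2]) u) := by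
  intro u
  induction u with
  | nil =>
    intro _ _ _ g k s a b c
    simp [pvBLoop, pvEmit]
  | cons v nxt ih =>
    intro hu hsub hmem g k s a b c
    have hvlt : ∀ z ∈ nxt, v < z := (List.pairwise_cons.1 hu).1
    have hunxt : nxt.Pairwise (· < ·) := (List.pairwise_cons.1 hu).2
    have hsub' : ∀ x ∈ nxt, x ∈ cs := fun x hx => hsub x (List.mem_cons_of_mem v hx)
    have hmem' : ∀ x : Int, x ∈ cs → x ∉ nxt → ∀ z ∈ nxt, x < z := by
      intro x hx hxn z hz
      by_cases hxv : x = v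
      · subst hxv; exact hvlt z hz
      · exact hmem x hx (by simp [hxv, hxn]) z (List.mem_cons_of_mem v hz)
    -- membership of v+1 / v+2 in cs read off the window
    have hm1 : (v + 1) ∈ cs ↔ nxt.head? = some (v + 1) := by
      constructor
      · intro hin
        by_cases hinu : (v + 1) ∈ (v :: nxt)
        · have hn : (v + 1) ∈ nxt := by
            rcases List.mem_cons.1 hinu with h | h
            · omega
            · exact h
          cases nxt with
          | nil => simp at hn
          | cons w rest =>
            have hw : v < w := hvlt w List.mem_cons_self
            rcases List.mem_cons.1 hn with h | h
            · simp [h]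
            · have := (List.pairwise_cons.1 hunxt).1 _ h
              omega
        · have := hmem (v + 1) hin hinu v List.mem_cons_self
          omega
      · intro hh
        cases nxt with
        | nil => simp at hh
        | cons w rest =>
          have : w = v + 1 := by simpa using hh
          exact hsub' _ (this ▸ List.mem_cons_self)
    have hm2 : (v + 2) ∈ cs ↔
        (nxt.head? = some (v + 2) ∨ (nxt.head? = some (v + 1) ∧ nxt.tail.head? = some (v + 2))) := by
      constructor
      · intro hin
        by_cases hinu : (v + 2) ∈ (v :: nxt)
        · have hn : (v + 2) ∈ nxt := by
            rcases List.mem_cons.1 hinu with h | h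
            · omega
            · exact h
          cases nxt with
          | nil => simp at hn
          | cons w rest =>
            have hw : v < w := hvlt w List.mem_cons_self
            rcases List.mem_cons.1 hn with h | h
            · exact Or.inl (by simp [h])
            · have hwle := (List.pairwise_cons.1 hunxt).1 _ h
              -- w < v+2 and v < w, so w = v+1; then v+2 is head of rest
              have hw1 : w = v + 1 := by omega
              cases rest with
              | nil => simp at h
              | cons w2 rest2 =>
                have hrest : rest2.Pairwise (· < ·) := (List.pairwise_cons.1 (List.pairwise_cons.1 hunxt).2).2
                rcases List.mem_cons.1 h with h2 | h2
                · exact Or.inr ⟨by simp [hw1], by simp [h2]⟩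
                · have hw2lt := (List.pairwise_cons.1 (List.pairwise_cons.1 hunxt).2).1 _ h2
                  have hw2gt : w < w2 := (List.pairwise_cons.1 hunxt).1 _ (List.mem_cons_self)
                  omega
        · have := hmem (v + 2) hin hinu v List.mem_cons_self
          omega
      · rintro (hh | ⟨_, hh⟩)
        · cases nxt with
          | nil => simp at hh
          | cons w rest =>
            have : w = v + 2 := by simpa using hh
            exact hsub' _ (this ▸ List.mem_cons_self)
        · cases nxt with
          | nil => simp at hh
          | cons w rest =>
            cases rest with
            | nil => simp at hh
            | cons w2 rest2 =>
              have : w2 = v + 2 := by simpa using hh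
              exact hsub' _ (this ▸ List.mem_cons_of_mem w (this ▸ List.mem_cons_self))
    -- the window booleans equal A's membership predicates
    have h1 : pvHas1 v (nxt.map (fun w => (w, (cs.count w : Int)))) = pvPbS cs v := by
      cases nxt with
      | nil =>
        have : (v + 1) ∉ cs := fun hin => by simp [hm1] at hin
        simp [pvHas1, pvPbS, this]
      | cons w rest =>
        simp only [List.map_cons, pvHas1, pvPbS]
        rw [Bool.eq_iff_iff]
        simp only [beq_iff_eq, List.contains_iff_mem]
        rw [hm1]
        simp
    have h2 : pvHas2 v (nxt.map (fun w => (w, (cs.count w : Int)))) = pvPcS cs v := by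
      cases nxt with
      | nil =>
        have : (v + 2) ∉ cs := fun hin => by simp [hm2] at hin
        simp [pvHas2, pvPcS, this]
      | cons w rest =>
        cases rest with
        | nil =>
          simp only [List.map_cons, List.map_nil, pvHas2, pvPcS]
          rw [Bool.eq_iff_iff]
          simp only [beq_iff_eq, Bool.or_eq_true, Bool.and_eq_true, List.contains_iff_mem]
          rw [hm2]
          simp
        | cons w2 rest2 =>
          simp only [List.map_cons, pvHas2, pvPcS]
          rw [Bool.eq_iff_iff]
          simp only [beq_iff_eq, Bool.or_eq_true, Bool.and_eq_true, List.contains_iff_mem]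
          rw [hm2]
          simp
    -- count-based conditions
    have hcntQ : PySem.List.count cs v = (cs.count v : Int) := by
      simp [PySem.List.count_eq]
    rw [List.map_cons]
    simp only [pvBLoop]
    rw [h1, h2]
    rw [ih hunxt hsub' hmem']
    clear ih hm1 hm2 h1 h2 hmem hmem' hsub hsub' hu hunxt hvlt
    refine congrArg₂ _ ?_ (congrArg₂ _ ?_ (congrArg₂ _ ?_ (congrArg₂ _ ?_ (congrArg₂ _ ?_ ?_))))
    · rw [pvEmit_cons]
      have hq : ((cs.count v : Int) == 4) = pvPg cs v := by
        rw [Bool.eq_iff_iff]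
        simp only [pvPg, PySem.List.count_eq, beq_iff_eq]
        omega
      rw [hq]
      split_ifs <;> simp
    · rw [pvEmit_cons]
      by_cases h3 : 3 ≤ (cs.count v : Int)
      · have hp : pvPk cs v = true := by
          simp only [pvPk, PySem.List.count_eq, decide_eq_true_eq]
          omega
        rw [if_pos h3, hp]
        simp
      · have hp : pvPk cs v = false := by
          simp only [pvPk, PySem.List.count_eq, decide_eq_false_iff_not]
          omega
        rw [if_neg h3, hp]
        simp
    · rw [pvEmit_cons]
      have hq : (pvPbS cs v && pvPcS cs v) = pvPs cs v := rfl
      rw [hq]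
      split_ifs <;> simp
    · rw [pvEmit_cons]
      cases big with
      | true =>
        simp only [if_true]
        have hq : ((cs.count v : Int) == 2) = pvPaB cs v := by
          rw [Bool.eq_iff_iff]
          simp only [pvPaB, PySem.List.count_eq, beq_iff_eq]
          omega
        rw [hq]
        split_ifs <;> simp
      | false =>
        simp only [Bool.false_eq_true, if_false]
        by_cases h2c : 2 ≤ (cs.count v : Int)
        · have hp : pvPaS cs v = true := by
            simp only [pvPaS, PySem.List.count_eq, decide_eq_true_eq]
            omega
          simp [hp, h2c]
        · have hp : pvPaS cs v = false := by
            simp only [pvPaS, PySem.List.count_eq, decide_eq_false_iff_not]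
            omega
          simp [hp, h2c]
    · rw [pvEmit_cons]
      cases big with
      | true =>
        simp only [if_true, Bool.not_true, Bool.false_or]
        have hq : (pvPbS cs v && !pvPcS cs v) = pvPbB cs v := rfl
        rw [hq]
        split_ifs <;> simp
      | false =>
        simp only [Bool.false_eq_true, if_false, Bool.not_false, Bool.true_or, Bool.and_true]
        split_ifs <;> simp
    · rw [pvEmit_cons]
      cases big with
      | true =>
        simp only [if_true, Bool.not_true, Bool.false_or]
        have hq : (pvPcS cs v && !pvPbS cs v) = pvPcB cs v := rfl
        rw [hq]
        split_ifs <;> simp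
      | false =>
        simp only [Bool.false_eq_true, if_false, Bool.not_false, Bool.true_or, Bool.and_true]
        split_ifs <;> simp

theorem pvB_char (cards : List Int) :
    get_32N_gang_alt cards =
      (if 12 ≤ (PySem.List.sorted cards (fun x => x)).length then
        pvOut (pvPg (PySem.List.sorted cards (fun x => x))) (pvPk (PySem.List.sorted cards (fun x => x)))
              (pvPs (PySem.List.sorted cards (fun x => x))) (pvPaB (PySem.List.sorted cards (fun x => x)))
              (pvPbB (PySem.List.sorted cards (fun x => x))) (pvPcB (PySem.List.sorted cards (fun x => x)))
              (pvU (PySem.List.sorted cards (fun x => x)))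
      else
        pvOut (pvPg (PySem.List.sorted cards (fun x => x))) (pvPk (PySem.List.sorted cards (fun x => x)))
              (pvPs (PySem.List.sorted cards (fun x => x))) (pvPaS (PySem.List.sorted cards (fun x => x)))
              (pvPbS (PySem.List.sorted cards (fun x => x))) (pvPcS (PySem.List.sorted cards (fun x => x)))
              (pvU (PySem.List.sorted cards (fun x => x)))) := by
  simp only [get_32N_gang_alt]
  set cs := PySem.List.sorted cards (fun x => x) with hcs
  have hsp : cs.Pairwise (· ≤ ·) := by
    have := PySem.List.sorted_pairwise cards (fun x => x)
    rw [← hcs] at this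
    exact this
  have hupw : (pvU cs).Pairwise (· < ·) := pvU_pairwise cs hsp
  have hsub : ∀ x ∈ pvU cs, x ∈ cs := fun x hx => (pvU_mem cs hsp x).1 hx
  have hmem : ∀ x : Int, x ∈ cs → x ∉ pvU cs → ∀ z ∈ pvU cs, x < z := by
    intro x hx hxn
    exact absurd ((pvU_mem cs hsp x).2 hx) hxn
  rw [pvRuns_char cs hsp]
  rw [pvBLoop_char cs (decide (12 ≤ cs.length)) (pvU cs) hupw hsub hmem [] [] [] [] [] []]
  by_cases hb : 12 ≤ cs.length
  · rw [if_pos hb]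
    simp only [decide_eq_true hb]
    simp [pvOut]
  · rw [if_neg hb]
    have : decide (12 ≤ cs.length) = false := by simpa using hb
    rw [this]
    simp [pvOut]

theorem pvMain (cards : List Int) (hnd : ¬ D_get_32N_gang cards) :
    get_32N_gang cards = get_32N_gang_alt cards := by
  rw [pvA_char, pvB_char]
  set cs := PySem.List.sorted cards (fun x => x) with hcs
  have hsp : cs.Pairwise (· ≤ ·) := by
    have := PySem.List.sorted_pairwise cards (fun x => x)
    rw [← hcs] at this
    exact this
  have hmem : ∀ x : Int, x ∈ cs ↔ x ∈ cards := by
    intro x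
    rw [hcs]
    exact PySem.List.mem_sorted cards (fun x => x) false x
  by_cases hh : cs.head? = some 0
  · -- the zero value is skipped by A; outside D_ it forms no meld, so nothing is lost
    obtain ⟨t, hct⟩ : ∃ t, cs = (0 : Int) :: t := by
      cases hcse : cs with
      | nil => rw [hcse] at hh; simp at hh
      | cons c t => rw [hcse] at hh; exact ⟨t, by simpa using hh⟩
    have h0cards : (0 : Int) ∈ cards := (hmem 0).1 (by rw [hct]; exact List.mem_cons_self)
    have hpos : ∀ y ∈ cards, 0 ≤ y := by
      intro y hy
      have h := PySem.List.key_head_sorted_le cards (fun x => x) (hcs ▸ hct) y hy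
      simpa using h
    have hnot : ¬ (2 ≤ cards.count (0 : Int) ∨ (1 : Int) ∈ cards ∨ (2 : Int) ∈ cards) :=
      fun h => hnd ⟨h0cards, hpos, h⟩
    have hcnt2 : ¬ 2 ≤ cards.count (0 : Int) := fun h => hnot (Or.inl h)
    have h1n : (1 : Int) ∉ cards := fun h => hnot (Or.inr (Or.inl h))
    have h2n : (2 : Int) ∉ cards := fun h => hnot (Or.inr (Or.inr h))
    have hcount1 : cs.count (0 : Int) = 1 := by
      have hpc : cs.count (0 : Int) = cards.count (0 : Int) :=
        (PySem.List.sorted_perm cards (fun x => x) false).count_eq 0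
      have hpos' : 0 < cards.count (0 : Int) := List.count_pos_iff.2 h0cards
      omega
    have hm1 : (1 : Int) ∉ cs := fun h => h1n ((hmem 1).1 h)
    have hm2 : (2 : Int) ∉ cs := fun h => h2n ((hmem 2).1 h)
    have e1 : pvPg cs 0 = false := by
      simp only [pvPg, PySem.List.count_eq, hcount1]
      decide
    have e2 : pvPk cs 0 = false := by
      simp only [pvPk, PySem.List.count_eq, hcount1]
      decide
    have e3 : pvPs cs 0 = false := by simp [pvPs, hm1]
    have e4B : pvPaB cs 0 = false := by
      simp only [pvPaB, PySem.List.count_eq, hcount1]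
      decide
    have e4S : pvPaS cs 0 = false := by
      simp only [pvPaS, PySem.List.count_eq, hcount1]
      decide
    have e5B : pvPbB cs 0 = false := by simp [pvPbB, hm1]
    have e5S : pvPbS cs 0 = false := by simp [pvPbS, hm1]
    have e6B : pvPcB cs 0 = false := by simp [pvPcB, hm2]
    have e6S : pvPcS cs 0 = false := by simp [pvPcS, hm2]
    have hU : pvU cs = (0 : Int) :: pvProc cs 0 := by rw [hct]; exact pvU_zero t
    rw [hU]
    by_cases hb : 12 ≤ cs.length
    · rw [if_pos hb, if_pos hb, pvOut_cons_zero _ _ _ _ _ _ _ e1 e2 e3 e4B e5B e6B]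
    · rw [if_neg hb, if_neg hb, pvOut_cons_zero _ _ _ _ _ _ _ e1 e2 e3 e4S e5S e6S]
  · rw [pvProc_eq_pvU cs hh]

theorem pvEmit_len_cons (p : Int → Bool) (f : Int → List Int) (P : List Int) :
    (pvEmit p f ((0 : Int) :: P)).length = (if p 0 = true then 1 else 0) + (pvEmit p f P).length := by
  rw [pvEmit_cons]
  split_ifs <;> simp [Nat.add_comm]

theorem pvOut_len_lt (q1 q2 q3 q4 q5 q6 : Int → Bool) (P : List Int)
    (h : q1 0 = true ∨ q2 0 = true ∨ q3 0 = true ∨ q4 0 = true ∨ q5 0 = true ∨ q6 0 = true) :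
    (pvOut q1 q2 q3 q4 q5 q6 P).length < (pvOut q1 q2 q3 q4 q5 q6 ((0 : Int) :: P)).length := by
  simp only [pvOut, List.length_append, pvEmit_len_cons]
  rcases h with h | h | h | h | h | h <;> simp only [h, if_true] <;> split_ifs <;> omega

theorem pvTight (cards : List Int) (hd : D_get_32N_gang cards) :
    get_32N_gang cards ≠ get_32N_gang_alt cards := by
  obtain ⟨h0, hpos, htrig⟩ := hd
  rw [pvA_char, pvB_char]
  set cs := PySem.List.sorted cards (fun x => x) with hcs
  have hmem : ∀ x : Int, x ∈ cs ↔ x ∈ cards := by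
    intro x
    rw [hcs]
    exact PySem.List.mem_sorted cards (fun x => x) false x
  have h0cs : (0 : Int) ∈ cs := (hmem 0).2 h0
  obtain ⟨t, hct⟩ : ∃ t, cs = (0 : Int) :: t := by
    cases hcse : cs with
    | nil => rw [hcse] at h0cs; simp at h0cs
    | cons c t =>
      refine ⟨t, ?_⟩
      have hle : c ≤ 0 := by
        have := PySem.List.key_head_sorted_le cards (fun x => x) (hcs ▸ hcse) 0 h0
        simpa using this
      have hge : 0 ≤ c := hpos c ((hmem c).1 (by rw [hcse]; exact List.mem_cons_self))
      have hc0 : c = 0 := le_antisymm hle hge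
      rw [hc0]
  have hU : pvU cs = (0 : Int) :: pvProc cs 0 := by rw [hct]; exact pvU_zero t
  have hcnt0 : cs.count (0 : Int) = cards.count (0 : Int) :=
    (PySem.List.sorted_perm cards (fun x => x) false).count_eq 0
  -- in each branch at least one predicate fires at 0
  have hbigD : pvPg cs 0 = true ∨ pvPk cs 0 = true ∨ pvPs cs 0 = true ∨
      pvPaB cs 0 = true ∨ pvPbB cs 0 = true ∨ pvPcB cs 0 = true := by
    rcases htrig with hc2 | h1 | h2
    · by_cases h3 : 3 ≤ cs.count (0 : Int)
      · refine Or.inr (Or.inl ?_)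
        simp only [pvPk, PySem.List.count_eq, decide_eq_true_eq]
        omega
      · refine Or.inr (Or.inr (Or.inr (Or.inl ?_)))
        simp only [pvPaB, PySem.List.count_eq, beq_iff_eq]
        omega
    · have h1cs : (1 : Int) ∈ cs := (hmem 1).2 h1
      by_cases h2cs : (2 : Int) ∈ cs
      · refine Or.inr (Or.inr (Or.inl ?_))
        simp [pvPs, h1cs, h2cs]
      · refine Or.inr (Or.inr (Or.inr (Or.inr (Or.inl ?_))))
        simp [pvPbB, h1cs, h2cs]
    · have h2cs : (2 : Int) ∈ cs := (hmem 2).2 h2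
      by_cases h1cs : (1 : Int) ∈ cs
      · refine Or.inr (Or.inr (Or.inl ?_))
        simp [pvPs, h1cs, h2cs]
      · refine Or.inr (Or.inr (Or.inr (Or.inr (Or.inr ?_))))
        simp [pvPcB, h1cs, h2cs]
  have hsmlD : pvPg cs 0 = true ∨ pvPk cs 0 = true ∨ pvPs cs 0 = true ∨
      pvPaS cs 0 = true ∨ pvPbS cs 0 = true ∨ pvPcS cs 0 = true := by
    rcases htrig with hc2 | h1 | h2
    · by_cases h3 : 3 ≤ cs.count (0 : Int)
      · refine Or.inr (Or.inl ?_)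
        simp only [pvPk, PySem.List.count_eq, decide_eq_true_eq]
        omega
      · refine Or.inr (Or.inr (Or.inr (Or.inl ?_)))
        simp only [pvPaS, PySem.List.count_eq, decide_eq_true_eq]
        omega
    · refine Or.inr (Or.inr (Or.inr (Or.inr (Or.inl ?_))))
      simp [pvPbS, (hmem 1).2 h1]
    · refine Or.inr (Or.inr (Or.inr (Or.inr (Or.inr ?_))))
      simp [pvPcS, (hmem 2).2 h2]
  rw [hU]
  by_cases hb : 12 ≤ cs.length
  · rw [if_pos hb, if_pos hb]
    intro heq
    have := congrArg List.length heq
    have hlt := pvOut_len_lt (pvPg cs) (pvPk cs) (pvPs cs) (pvPaB cs) (pvPbB cs) (pvPcB cs)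
      (pvProc cs 0) hbigD
    omega
  · rw [if_neg hb, if_neg hb]
    intro heq
    have := congrArg List.length heq
    have hlt := pvOut_len_lt (pvPg cs) (pvPk cs) (pvPs cs) (pvPaS cs) (pvPbS cs) (pvPcS cs)
      (pvProc cs 0) hsmlD
    omega

-- ===== VERDICT (by name: the statement is the Claim_ definition above) =====
theorem get_32N_gang_spec : Claim_unchanged_get_32N_gang := by
  intro cards _ hnd
  exact pvMain cards hnd

theorem get_32N_gang_changed : Claim_changed_get_32N_gang := by
  unfold Claim_changed_get_32N_gang; decide

theorem get_32N_gang_tight : Claim_exact_get_32N_gang := by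
  intro cards _ hd
  exact pvTight cards hd
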